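-- pv_equiv track=rewrite | github.com/Pritz69/GFG_POTD | 19_jan.py | carpetBox
-- ===== SOURCE A (Python) =====
-- def carpetBox(A,B,C,D):
--     #code here
--     def solve(A,B,C,D):
--         ans=0
--         while A > C or B > D :
--             if A > C :
--                 ans +=1
--                 A = A//2
--             if B > D :
--                 ans +=1
--                 B = B//2
--         return ans
--     return min(solve(A,B,C,D),solve(B,A,C,D))
-- ===== SOURCE B (Python) =====
-- def carpetBox(A, B, C, D):
--     # closed form: halvings needed to bring x (> lim >= 0) down to <= lim,
--     # computed from bit lengths instead of iterating.
--     def count(x, lim):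
--         if x <= lim:
--             return 0
--         n = x.bit_length() - lim.bit_length()
--         if (x >> n) > lim:
--             n += 1
--         return n
--     return min(count(A, C) + count(B, D), count(B, C) + count(A, D))
-- ===== Notes on version B (the rewrite author's own statement) =====
-- stated objective: alternative
-- what changed: Replaces A's interleaved halving while-loop (run twice with swapped dimensions) by a loop-free closed form: each per-dimension halving count is computed from bit lengths (n = x.bit_length() - lim.bit_length(), corrected by one shift test), then the four counts are combined with min.
import Mathlib
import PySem

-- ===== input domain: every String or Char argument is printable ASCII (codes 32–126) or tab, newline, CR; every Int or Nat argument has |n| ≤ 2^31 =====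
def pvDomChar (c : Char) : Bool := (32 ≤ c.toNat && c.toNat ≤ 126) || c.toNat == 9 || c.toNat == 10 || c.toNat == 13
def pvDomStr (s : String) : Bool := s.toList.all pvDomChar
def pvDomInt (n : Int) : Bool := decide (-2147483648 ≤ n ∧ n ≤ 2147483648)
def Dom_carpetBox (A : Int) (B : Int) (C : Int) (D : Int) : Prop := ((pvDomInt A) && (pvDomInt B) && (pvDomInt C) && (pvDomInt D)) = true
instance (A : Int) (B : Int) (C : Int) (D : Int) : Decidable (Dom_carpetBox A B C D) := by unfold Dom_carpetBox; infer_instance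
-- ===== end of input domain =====

-- B replaces A's interleaved halving while-loop by a loop-free closed form computed
-- from bit lengths (objective: alternative algorithm; no loop at all in B).

-- ===== PORT A =====
-- A's inner 'solve': one interleaved loop over both dimensions; fuel only makes the
-- Lean function total (under Pre_ the fuel is never exhausted — the loop terminates).
def solveFuel : Nat → Int → Int → Int → Int → Int → Int
  | 0, _, _, _, _, ans => ans
  | f+1, A, B, C, D, ans =>
    if C < A ∨ D < B then
      let ans1 := if C < A then ans + 1 else ans
      let A1 := if C < A then PySem.Int.floordiv A 2 else A
      let ans2 := if D < B then ans1 + 1 else ans1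
      let B1 := if D < B then PySem.Int.floordiv B 2 else B
      solveFuel f A1 B1 C D ans2
    else ans

def carpetBox (A : Int) (B : Int) (C : Int) (D : Int) : Int :=
  min (solveFuel 8589934592 A B C D 0) (solveFuel 8589934592 B A C D 0)

-- ===== PORT B =====
-- Python int.bit_length(): number of bits of |n| (exact here: Nat.size).
def pyBitLength (n : Int) : Nat := Nat.size n.natAbs

-- B's helper 'count': closed form, no loop. x >> n is floor division by 2^n
-- (exact for n ≥ 0, which holds whenever Pre_ admits the input).
def countB (x lim : Int) : Int :=
  if x ≤ lim then 0
  else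
    let n : Int := (pyBitLength x : Int) - (pyBitLength lim : Int)
    if lim < PySem.Int.floordiv x (2 ^ n.toNat) then n + 1 else n

def carpetBox_alt (A : Int) (B : Int) (C : Int) (D : Int) : Int :=
  min (countB A C + countB B D) (countB B C + countB A D)

-- ===== PRECONDITION & SPEC =====
-- Pre_ excludes exactly the inputs on which the Python A never returns: a dimension x
-- compared against a negative limit lim with x > lim loops forever (x//2 never goes
-- below -1), so A diverges unless every compared pair already fits or has limit ≥ 0.
def Pre_carpetBox (A : Int) (B : Int) (C : Int) (D : Int) : Prop :=
  (A ≤ C ∨ 0 ≤ C) ∧ (B ≤ D ∨ 0 ≤ D) ∧ (B ≤ C ∨ 0 ≤ C) ∧ (A ≤ D ∨ 0 ≤ D)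
instance (A : Int) (B : Int) (C : Int) (D : Int) : Decidable (Pre_carpetBox A B C D) := by unfold Pre_carpetBox; infer_instance

def pvWitness_carpetBox : Int × Int × Int × Int := (8, 9, 2, 3)

def Spec_carpetBox (A : Int) (B : Int) (C : Int) (D : Int) (out : Int) : Prop := out = carpetBox_alt A B C D
instance (A : Int) (B : Int) (C : Int) (D : Int) (out : Int) : Decidable (Spec_carpetBox A B C D out) := by unfold Spec_carpetBox; infer_instance

-- ===== CLAIM (what is proved, stated in full; the proofs are below) =====
def Claim_equal_carpetBox : Prop := ∀ (A : Int) (B : Int) (C : Int) (D : Int), Dom_carpetBox A B C D → Pre_carpetBox A B C D → Spec_carpetBox A B C D (carpetBox A B C D)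

-- ===== LEMMAS AND PROOFS =====

-- Number of halvings needed to bring x to ≤ lim (0 when lim < 0: then either the loop
-- never runs, or the Python diverges — excluded by Pre_).
def cnt (x lim : Int) : Nat :=
  if h : 0 ≤ lim ∧ lim < x then cnt (PySem.Int.floordiv x 2) lim + 1 else 0
termination_by x.toNat
decreasing_by
  rw [PySem.Int.floordiv_eq_ediv_of_pos (by omega : (0:Int) < 2)]
  omega

theorem cnt_le_toNat (x lim : Int) : cnt x lim ≤ x.toNat := by
  rw [cnt]
  split
  · next h =>
    have ih := cnt_le_toNat (PySem.Int.floordiv x 2) lim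
    rw [PySem.Int.floordiv_eq_ediv_of_pos (by omega : (0:Int) < 2)] at ih ⊢
    omega
  · omega
termination_by x.toNat
decreasing_by
  rw [PySem.Int.floordiv_eq_ediv_of_pos (by omega : (0:Int) < 2)]
  omega

theorem solveFuel_eq (fuel : Nat) (A B C D ans : Int)
    (hA : A ≤ C ∨ 0 ≤ C) (hB : B ≤ D ∨ 0 ≤ D)
    (hf : cnt A C + cnt B D ≤ fuel) :
    solveFuel fuel A B C D ans = ans + cnt A C + cnt B D := by
  induction fuel generalizing A B ans with
  | zero =>
    have hA0 : cnt A C = 0 := by omega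
    have hB0 : cnt B D = 0 := by omega
    simp [solveFuel, hA0, hB0]
  | succ f ih =>
    by_cases h : C < A ∨ D < B
    · simp only [solveFuel, if_pos h]
      by_cases hca : C < A <;> by_cases hdb : D < B
      · have h0C : 0 ≤ C := by rcases hA with h' | h' <;> omega
        have h0D : 0 ≤ D := by rcases hB with h' | h' <;> omega
        have hcA : cnt A C = cnt (PySem.Int.floordiv A 2) C + 1 := by
          rw [cnt, dif_pos ⟨h0C, hca⟩]
        have hcB : cnt B D = cnt (PySem.Int.floordiv B 2) D + 1 := by
          rw [cnt, dif_pos ⟨h0D, hdb⟩]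
        simp only [if_pos hca, if_pos hdb]
        rw [ih (PySem.Int.floordiv A 2) (PySem.Int.floordiv B 2) (ans + 1 + 1)
            (Or.inr h0C) (Or.inr h0D) (by omega)]
        rw [hcA, hcB]; push_cast; ring
      · have h0C : 0 ≤ C := by rcases hA with h' | h' <;> omega
        have hcA : cnt A C = cnt (PySem.Int.floordiv A 2) C + 1 := by
          rw [cnt, dif_pos ⟨h0C, hca⟩]
        simp only [if_pos hca, if_neg hdb]
        rw [ih (PySem.Int.floordiv A 2) B (ans + 1) (Or.inr h0C) hB (by omega)]
        rw [hcA]; push_cast; ring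
      · have h0D : 0 ≤ D := by rcases hB with h' | h' <;> omega
        have hcB : cnt B D = cnt (PySem.Int.floordiv B 2) D + 1 := by
          rw [cnt, dif_pos ⟨h0D, hdb⟩]
        simp only [if_neg hca, if_pos hdb]
        rw [ih A (PySem.Int.floordiv B 2) (ans + 1) hA (Or.inr h0D) (by omega)]
        rw [hcB]; push_cast; ring
      · exact absurd h (by tauto)
    · have hA0 : cnt A C = 0 := by rw [cnt, dif_neg (by omega)]
      have hB0 : cnt B D = 0 := by rw [cnt, dif_neg (by omega)]
      simp only [solveFuel, if_neg h]
      omega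

-- Nat version of the halving count.
def cntN (a l : Nat) : Nat :=
  if l < a then cntN (a / 2) l + 1 else 0
termination_by a
decreasing_by exact Nat.div_lt_self (by omega) (by omega)

theorem cnt_eq_cntN (x lim : Int) (h : 0 ≤ lim) : cnt x lim = cntN x.toNat lim.toNat := by
  rw [cnt, cntN]
  by_cases hlt : lim < x
  · rw [dif_pos ⟨h, hlt⟩, if_pos (by omega)]
    have hfd : PySem.Int.floordiv x 2 = x / 2 :=
      PySem.Int.floordiv_eq_ediv_of_pos (by omega)
    have ih := cnt_eq_cntN (PySem.Int.floordiv x 2) lim h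
    rw [ih]
    congr 2
    rw [hfd]; omega
  · rw [dif_neg (by tauto), if_neg (by omega)]
termination_by x.toNat
decreasing_by
  rw [PySem.Int.floordiv_eq_ediv_of_pos (by omega : (0:Int) < 2)]
  omega

theorem div_pow_succ (a k : Nat) : a / 2 ^ (k + 1) = (a / 2) / 2 ^ k := by
  rw [Nat.div_div_eq_div_mul, pow_succ']

theorem cntN_le (a l : Nat) : a / 2 ^ (cntN a l) ≤ l := by
  rw [cntN]
  by_cases hlt : l < a
  · rw [if_pos hlt, div_pow_succ]
    exact cntN_le (a / 2) l
  · rw [if_neg hlt]; simpa using Nat.le_of_not_lt hlt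
termination_by a
decreasing_by exact Nat.div_lt_self (by omega) (by omega)

theorem cntN_min (a l : Nat) : ∀ k < cntN a l, l < a / 2 ^ k := by
  intro k hk
  rw [cntN] at hk
  by_cases hlt : l < a
  · rw [if_pos hlt] at hk
    cases k with
    | zero => simpa using hlt
    | succ j =>
        rw [div_pow_succ]
        exact cntN_min (a / 2) l j (by omega)
  · rw [if_neg hlt] at hk; omega
termination_by a
decreasing_by exact Nat.div_lt_self (by omega) (by omega)

theorem cntN_unique (a l n : Nat) (h1 : a / 2 ^ n ≤ l)
    (h2 : ∀ k < n, l < a / 2 ^ k) : n = cntN a l := by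
  rcases Nat.lt_trichotomy n (cntN a l) with h | h | h
  · exact absurd (cntN_min a l n h) (by omega)
  · exact h
  · exact absurd (h2 _ h) (by have := cntN_le a l; omega)

theorem div_pow_antitone (a j k : Nat) (hjk : j ≤ k) : a / 2 ^ k ≤ a / 2 ^ j :=
  Nat.div_le_div_left (Nat.pow_le_pow_right (by omega) hjk) (Nat.two_pow_pos j)

-- The closed-form bit-length count equals the halving count, for l < a.
theorem formula_eq_cntN (a l : Nat) (hla : l < a) :
    (if l < a / 2 ^ (Nat.size a - Nat.size l) then (Nat.size a - Nat.size l) + 1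
     else Nat.size a - Nat.size l) = cntN a l := by
  have hsz : Nat.size l ≤ Nat.size a := Nat.size_le_size (by omega)
  have ha1 : 1 ≤ a := by omega
  have hlta : a < 2 ^ (Nat.size a) := Nat.lt_size_self a
  have hG1 : a / 2 ^ (Nat.size a - Nat.size l) < 2 ^ (Nat.size l) := by
    rw [Nat.div_lt_iff_lt_mul (Nat.two_pow_pos _), ← pow_add]
    have : Nat.size l + (Nat.size a - Nat.size l) = Nat.size a := by omega
    rw [this]; exact hlta
  split_ifs with hbr
  · -- branch taken: answer is n0 + 1
    apply cntN_unique
    · -- a / 2^(n0+1) ≤ l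
      have hl1 : 1 ≤ Nat.size l := by
        rcases Nat.eq_zero_or_pos (Nat.size l) with h0 | h0
        · exfalso; rw [h0] at hG1 hbr; rw [pow_zero] at hG1; omega
        · exact h0
      have h2l : 2 ^ (Nat.size l - 1) ≤ l := Nat.lt_size.mp (by omega)
      have e1 : a / 2 ^ (Nat.size a - Nat.size l + 1)
          = a / 2 ^ (Nat.size a - Nat.size l) / 2 := by
        rw [Nat.div_div_eq_div_mul, pow_succ]
      rw [e1]
      have e2 : a / 2 ^ (Nat.size a - Nat.size l) / 2 < 2 ^ (Nat.size l - 1) := by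
        rw [Nat.div_lt_iff_lt_mul (by omega)]
        have e3 : 2 ^ (Nat.size l) = 2 ^ (Nat.size l - 1) * 2 := by
          rw [← pow_succ]; congr 1; omega
        omega
      omega
    · intro k hk
      have : a / 2 ^ (Nat.size a - Nat.size l) ≤ a / 2 ^ k := div_pow_antitone a k _ (by omega)
      omega
  · -- branch not taken: answer is n0
    apply cntN_unique
    · exact Nat.le_of_not_lt hbr
    · intro k hk
      have hn0 : 1 ≤ Nat.size a - Nat.size l := by omega
      have hsa : 2 ^ (Nat.size a - 1) ≤ a := Nat.lt_size.mp (by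
        have : 1 ≤ Nat.size a := Nat.size_pos.mpr ha1
        omega)
      have hG2 : 2 ^ (Nat.size l) ≤ a / 2 ^ (Nat.size a - Nat.size l - 1) := by
        calc 2 ^ (Nat.size l) = 2 ^ (Nat.size a - 1) / 2 ^ (Nat.size a - Nat.size l - 1) := by
              rw [Nat.pow_div (by omega) (by omega)]
              congr 1; omega
          _ ≤ a / 2 ^ (Nat.size a - Nat.size l - 1) := Nat.div_le_div_right hsa
      have hll : l < 2 ^ (Nat.size l) := Nat.lt_size_self l
      have : a / 2 ^ (Nat.size a - Nat.size l - 1) ≤ a / 2 ^ k := div_pow_antitone a k _ (by omega)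
      omega

-- B's count equals the halving count on every Pre_-admitted pair.
theorem countB_eq (x lim : Int) (h : x ≤ lim ∨ 0 ≤ lim) :
    countB x lim = (cnt x lim : Int) := by
  unfold countB
  by_cases hle : x ≤ lim
  · rw [if_pos hle, cnt, dif_neg (by omega)]; simp
  · have h0 : 0 ≤ lim := by tauto
    have hlt : lim < x := by omega
    rw [if_neg hle, cnt_eq_cntN x lim h0]
    have hax : x.natAbs = x.toNat := by omega
    have hal : lim.natAbs = lim.toNat := by omega
    have hsz : Nat.size lim.toNat ≤ Nat.size x.toNat := Nat.size_le_size (by omega)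
    have hn : ((pyBitLength x : Int) - (pyBitLength lim : Int)).toNat
        = Nat.size x.toNat - Nat.size lim.toNat := by
      unfold pyBitLength; rw [hax, hal]; omega
    have hfd : PySem.Int.floordiv x (2 ^ ((pyBitLength x : Int) - (pyBitLength lim : Int)).toNat)
        = ((x.toNat / 2 ^ (Nat.size x.toNat - Nat.size lim.toNat) : Nat) : Int) := by
      rw [hn, PySem.Int.floordiv_eq_ediv_of_pos (by positivity)]
      rw [show (2:Int) ^ (Nat.size x.toNat - Nat.size lim.toNat)
            = ((2 ^ (Nat.size x.toNat - Nat.size lim.toNat) : Nat) : Int) by push_cast; ring]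
      rw [show x = ((x.toNat : Nat) : Int) by omega]
      exact (Int.natCast_ediv _ _).symm
    have key := formula_eq_cntN x.toNat lim.toNat (by omega)
    simp only [hfd]
    by_cases hbr : lim.toNat < x.toNat / 2 ^ (Nat.size x.toNat - Nat.size lim.toNat)
    · rw [if_pos (by exact_mod_cast (by omega : lim < ((x.toNat / 2 ^ (Nat.size x.toNat - Nat.size lim.toNat) : Nat) : Int)))]
      rw [if_pos hbr] at key
      unfold pyBitLength; rw [hax, hal]
      omega
    · rw [if_neg (by omega)]
      rw [if_neg hbr] at key
      unfold pyBitLength; rw [hax, hal]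
      omega

-- ===== VERDICT (by name: the statement is the Claim_ definition above) =====
theorem carpetBox_spec : Claim_equal_carpetBox := by
  intro A B C D hdom hpre
  obtain ⟨h1, h2, h3, h4⟩ := hpre
  have bA := cnt_le_toNat A C
  have bB := cnt_le_toNat B D
  have bA' := cnt_le_toNat A D
  have bB' := cnt_le_toNat B C
  simp only [Dom_carpetBox, pvDomInt, Bool.and_eq_true, decide_eq_true_eq] at hdom
  unfold Spec_carpetBox carpetBox carpetBox_alt
  rw [solveFuel_eq 8589934592 A B C D 0 h1 h2 (by omega),
      solveFuel_eq 8589934592 B A C D 0 h3 h4 (by omega),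
      countB_eq A C h1, countB_eq B D h2, countB_eq B C h3, countB_eq A D h4]
  omega
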